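-- pv_equiv track=rewrite | github.com/liuyingxuvka/Job-Hunter | desktop_app/src/jobflow_desktop_app/ai/model_catalog.py | _prioritize_probe_candidates
-- ===== SOURCE A (Python) =====
-- def _prioritize_probe_candidates(models: list[str], max_probe: int = 20) -> list[str]:
--     cleaned = _dedup_models(models)
--     scored: list[tuple[int, str]] = []
--     for model_id in cleaned:
--         score = _probe_priority(model_id)
--         if score >= 1000:
--             continue
--         scored.append((score, model_id))
--     scored.sort(key=lambda item: (item[0], item[1].casefold()))
--     if max_probe <= 0:
--         return [item[1] for item in scored]
--     return [item[1] for item in scored[:max_probe]]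
--
-- def _probe_priority(model_id: str) -> int:
--     text = str(model_id or "").strip()
--     if not text:
--         return 2000
--     lower = text.casefold()
--     blocked_markers = (
--         "embedding",
--         "whisper",
--         "transcribe",
--         "audio",
--         "tts",
--         "speech",
--         "realtime",
--         "moderation",
--         "image",
--         "dall",
--         "omni-moderation",
--         "search",
--         "ranker",
--     )
--     if any(marker in lower for marker in blocked_markers):
--         return 2000
--
--     if "gpt-5.3-codex" in lower:
--         return 0
--     if "codex" in lower:
--         return 1
--     if "nano" in lower:
--         return 2
--     if "mini" in lower:
--         return 3
--     if "small" in lower or "lite" in lower: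
--         return 4
--     if "gpt" in lower:
--         return 5
--     if lower.startswith("o"):
--         return 6
--     return 20
--
-- def _dedup_models(values: list[str]) -> list[str]:
--     ordered: list[str] = []
--     seen: set[str] = set()
--     for raw in values:
--         text = str(raw or "").strip()
--         if not text:
--             continue
--         key = text.casefold()
--         if key in seen:
--             continue
--         seen.add(key)
--         ordered.append(text)
--     return ordered
-- ===== SOURCE B (Python) =====
-- def _probe_priority(model_id: str) -> int:
--     text = str(model_id or "").strip()
--     if not text:
--         return 2000
--     lower = text.casefold()
--     blocked_markers = (
--         "embedding", "whisper", "transcribe", "audio", "tts", "speech",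
--         "realtime", "moderation", "image", "dall", "omni-moderation",
--         "search", "ranker",
--     )
--     if any(marker in lower for marker in blocked_markers):
--         return 2000
--     if "gpt-5.3-codex" in lower:
--         return 0
--     if "codex" in lower:
--         return 1
--     if "nano" in lower:
--         return 2
--     if "mini" in lower:
--         return 3
--     if "small" in lower or "lite" in lower:
--         return 4
--     if "gpt" in lower:
--         return 5
--     if lower.startswith("o"):
--         return 6
--     return 20
--
--
-- def _dedup_models(values: list[str]) -> list[str]:
--     ordered: list[str] = []
--     seen: set[str] = set()
--     for raw in values:
--         text = str(raw or "").strip()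
--         if not text:
--             continue
--         key = text.casefold()
--         if key in seen:
--             continue
--         seen.add(key)
--         ordered.append(text)
--     return ordered
--
--
-- def _prioritize_probe_candidates(models: list[str], max_probe: int = 20) -> list[str]:
--     # Bucket survivors by priority score, then emit buckets in ascending
--     # score order, each sorted by casefold -- no tuple-key global sort.
--     buckets: dict[int, list[str]] = {}
--     for model_id in _dedup_models(models):
--         score = _probe_priority(model_id)
--         if score < 1000:
--             buckets.setdefault(score, []).append(model_id)
--     result: list[str] = []
--     for score in sorted(buckets):
--         result.extend(sorted(buckets[score], key=str.casefold))
--     return result if max_probe <= 0 else result[:max_probe]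
-- ===== Notes on version B (the rewrite author's own statement) =====
-- stated objective: alternative
-- what changed: B replaces A's single stable sort on (score, casefold) tuple keys with a dict-of-lists bucket pass keyed by priority score, then emits the buckets in ascending score order, each sorted by casefold alone.
import Mathlib
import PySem

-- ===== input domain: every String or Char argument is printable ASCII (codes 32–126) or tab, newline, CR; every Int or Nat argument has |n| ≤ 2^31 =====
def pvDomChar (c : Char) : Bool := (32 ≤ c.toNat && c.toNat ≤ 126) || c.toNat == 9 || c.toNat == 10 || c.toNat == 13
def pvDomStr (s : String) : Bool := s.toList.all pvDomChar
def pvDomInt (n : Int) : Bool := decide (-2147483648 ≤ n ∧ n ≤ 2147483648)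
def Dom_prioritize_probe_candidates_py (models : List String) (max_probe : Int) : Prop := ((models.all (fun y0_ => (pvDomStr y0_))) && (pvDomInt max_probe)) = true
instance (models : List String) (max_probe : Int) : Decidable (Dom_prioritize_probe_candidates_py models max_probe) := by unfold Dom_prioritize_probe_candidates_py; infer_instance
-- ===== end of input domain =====

-- B replaces A's single tuple-key sort with per-score dict buckets emitted in ascending
-- score order (objective: alternative decomposition, same exact output).
-- str.casefold() is ported as PySem.Str.lower: identical on the ASCII input domain.

-- ===== PORT A =====
-- shared module helper _probe_priority (used verbatim by both Pythons)
def probePriority (model_id : String) : Int :=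
  -- text = str(model_id or "").strip(): `or ""` only replaces the empty string, on which strip agrees
  let text := PySem.Str.strip model_id
  if text = "" then 2000
  else
    let lower := PySem.Str.lower text
    -- any(marker in lower for marker in blocked_markers), in tuple order
    if PySem.Str.isIn "embedding" lower || PySem.Str.isIn "whisper" lower ||
       PySem.Str.isIn "transcribe" lower || PySem.Str.isIn "audio" lower ||
       PySem.Str.isIn "tts" lower || PySem.Str.isIn "speech" lower ||
       PySem.Str.isIn "realtime" lower || PySem.Str.isIn "moderation" lower ||
       PySem.Str.isIn "image" lower || PySem.Str.isIn "dall" lower ||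
       PySem.Str.isIn "omni-moderation" lower || PySem.Str.isIn "search" lower ||
       PySem.Str.isIn "ranker" lower then 2000
    else if PySem.Str.isIn "gpt-5.3-codex" lower then 0
    else if PySem.Str.isIn "codex" lower then 1
    else if PySem.Str.isIn "nano" lower then 2
    else if PySem.Str.isIn "mini" lower then 3
    else if PySem.Str.isIn "small" lower || PySem.Str.isIn "lite" lower then 4
    else if PySem.Str.isIn "gpt" lower then 5
    else if PySem.Str.startswith lower "o" then 6
    else 20

-- shared module helper _dedup_models (used verbatim by both Pythons); loop state = (ordered, seen)
def dedupStep (st : List String × PySem.Set String) (raw : String) : List String × PySem.Set String :=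
  let text := PySem.Str.strip raw
  if text = "" then st
  else
    let key := PySem.Str.lower text
    if PySem.Set.contains st.2 key then st
    else (st.1 ++ [text], PySem.Set.add st.2 key)

def dedupModels (values : List String) : List String :=
  (values.foldl dedupStep ([], PySem.Set.empty)).1

def prioritize_probe_candidates_py (models : List String) (max_probe : Int) : List String :=
  let cleaned := dedupModels models
  let scored : List (Int × String) :=
    cleaned.foldl (fun acc model_id =>
      let score := probePriority model_id
      if score ≥ 1000 then acc else acc ++ [(score, model_id)]) []
  let sortedScored := PySem.List.sorted2 scored (fun item => item.1) (fun item => PySem.Str.lower item.2)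
  if max_probe ≤ 0 then sortedScored.map (fun item => item.2)
  else (PySem.List.slice sortedScored none (some max_probe)).map (fun item => item.2)

-- ===== PORT B =====
def prioritize_probe_candidates_py_alt (models : List String) (max_probe : Int) : List String :=
  let buckets : PySem.Dict Int (List String) :=
    (dedupModels models).foldl (fun d model_id =>
      let score := probePriority model_id
      if score < 1000 then d.modify score [] (fun b => b ++ [model_id]) else d) PySem.Dict.empty
  let result :=
    (PySem.List.sorted (PySem.Dict.keys buckets) (fun k => k)).foldl
      (fun acc score => acc ++ PySem.List.sorted (buckets.getD score []) (fun m => PySem.Str.lower m)) []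
  if max_probe ≤ 0 then result else PySem.List.slice result none (some max_probe)

-- ===== PRECONDITION & SPEC =====
def Spec_prioritize_probe_candidates_py (models : List String) (max_probe : Int) (out : List String) : Prop := out = prioritize_probe_candidates_py_alt models max_probe
instance (models : List String) (max_probe : Int) (out : List String) : Decidable (Spec_prioritize_probe_candidates_py models max_probe out) := by unfold Spec_prioritize_probe_candidates_py; infer_instance

-- ===== CLAIM (what is proved, stated in full; the proofs are below) =====
def Claim_equal_prioritize_probe_candidates_py : Prop := ∀ (models : List String) (max_probe : Int), Dom_prioritize_probe_candidates_py models max_probe → Spec_prioritize_probe_candidates_py models max_probe (prioritize_probe_candidates_py models max_probe)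

-- ===== LEMMAS AND PROOFS =====

-- the dedup loop yields a list whose casefold keys are pairwise distinct
theorem dedup_aux_nodup (l : List String) (ord : List String) (seen : PySem.Set String)
    (h1 : (ord.map PySem.Str.lower).Nodup)
    (h2 : ∀ m ∈ ord, PySem.Set.contains seen (PySem.Str.lower m) = true) :
    (((l.foldl dedupStep (ord, seen)).1).map PySem.Str.lower).Nodup := by
  induction l generalizing ord seen with
  | nil => simpa using h1
  | cons x xs ih =>
    simp only [List.foldl_cons]
    by_cases hx : PySem.Str.strip x = ""
    · rw [show dedupStep (ord, seen) x = (ord, seen) by simp [dedupStep, hx]]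
      exact ih ord seen h1 h2
    · by_cases hc : PySem.Set.contains seen (PySem.Str.lower (PySem.Str.strip x)) = true
      · have hc' := (PySem.Set.contains_iff _ _).mp hc
        rw [show dedupStep (ord, seen) x = (ord, seen) by simp [dedupStep, hx, hc']]
        exact ih ord seen h1 h2
      · have hc' : PySem.Str.lower (PySem.Str.strip x) ∉ seen :=
          fun hmem => hc ((PySem.Set.contains_iff _ _).mpr hmem)
        rw [show dedupStep (ord, seen) x
            = (ord ++ [PySem.Str.strip x], PySem.Set.add seen (PySem.Str.lower (PySem.Str.strip x))) by
          simp [dedupStep, hx, hc']]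
        apply ih
        · rw [List.map_append]
          refine List.Nodup.append h1 (by simp) ?_
          intro a ha hb
          simp only [List.map_cons, List.map_nil, List.mem_cons, List.not_mem_nil, or_false] at hb
          subst hb
          rcases List.mem_map.mp ha with ⟨m, hm, hml⟩
          exact hc (by rw [← hml]; exact h2 m hm)
        · intro m hm
          rcases List.mem_append.mp hm with hm | hm
          · rw [PySem.Set.contains_iff]
            exact (PySem.Set.mem_add _ _ _).mpr (Or.inl ((PySem.Set.contains_iff _ _).mp (h2 m hm)))
          · simp only [List.mem_cons, List.not_mem_nil, or_false] at hm
            subst hm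
            rw [PySem.Set.contains_iff]
            exact (PySem.Set.mem_add _ _ _).mpr (Or.inr rfl)

theorem cleaned_low_nodup (models : List String) :
    ((dedupModels models).map PySem.Str.lower).Nodup := by
  apply dedup_aux_nodup models [] PySem.Set.empty
  · simp
  · intro m hm; cases hm

-- sorted2 with keys k1, k2 is sorted with the lexicographic key toLex (k1 ·, k2 ·)
theorem sorted2_as_lex {α κ₁ κ₂ : Type} [LinearOrder κ₁] [LinearOrder κ₂]
    (xs : List α) (k1 : α → κ₁) (k2 : α → κ₂) :
    PySem.List.sorted2 xs k1 k2 = PySem.List.sorted xs (fun a => toLex (k1 a, k2 a)) := by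
  unfold PySem.List.sorted2 PySem.List.sorted
  simp only [if_neg (by decide : ¬ (false = true))]
  congr 1
  funext acc a
  congr 1
  funext p q
  rcases lt_trichotomy (k1 p) (k1 q) with h | h | h
  · simp [h, Prod.Lex.toLex_lt_toLex]
  · simp [h, Prod.Lex.toLex_lt_toLex]
  · simp [not_lt_of_gt h, ne_of_gt h, Prod.Lex.toLex_lt_toLex, h]

-- partitioning a list by a key over a Nodup cover of its keys is a permutation of the list
theorem flatMap_filter_key_perm {α κ : Type} [DecidableEq κ] [BEq κ] [LawfulBEq κ]
    (ks : List κ) (l : List α) (p : α → κ)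
    (hnd : ks.Nodup) (hcov : ∀ a ∈ l, p a ∈ ks) :
    (ks.flatMap (fun s => l.filter (fun a => p a == s))).Perm l := by
  induction ks generalizing l with
  | nil =>
    cases l with
    | nil => simp
    | cons a t => exact absurd (hcov a (by simp)) (by simp)
  | cons k ks ih =>
    simp only [List.flatMap_cons]
    have hrw : ∀ s ∈ ks, l.filter (fun a => p a == s)
        = (l.filter (fun a => !(p a == k))).filter (fun a => p a == s) := by
      intro s hs
      rw [List.filter_filter]
      apply List.filter_congr
      intro a _
      by_cases hpa : p a = s
      · have hsk : ¬ s = k := fun h => (List.nodup_cons.mp hnd).1 (h ▸ hs)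
        simp [hpa, hsk]
      · simp [hpa]
    have hfl : ks.flatMap (fun s => l.filter (fun a => p a == s))
        = ks.flatMap (fun s => (l.filter (fun a => !(p a == k))).filter (fun a => p a == s)) := by
      simp only [List.flatMap]
      congr 1
      exact List.map_congr_left hrw
    rw [hfl]
    have hih := ih (l.filter (fun a => !(p a == k))) (List.nodup_cons.mp hnd).2 ?_
    · exact (List.Perm.append_left _ hih).trans (List.filter_append_perm _ l)
    · intro a ha
      have := List.of_mem_filter ha
      have hmem := hcov a (List.mem_of_mem_filter ha)
      simp only [Bool.not_eq_eq_eq_not, Bool.not_true, beq_eq_false_iff_ne, ne_eq] at this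
      rcases List.mem_cons.mp hmem with h | h
      · exact absurd h this
      · exact h

-- Pairwise over a flatMap of buckets, from strictly ordered keys
theorem pairwise_flatMap_buckets {κ α : Type} (R : α → α → Prop) (lt : κ → κ → Prop)
    (ks : List κ) (f : κ → List α)
    (hks : ks.Pairwise lt)
    (hin : ∀ s ∈ ks, (f s).Pairwise R)
    (hcross : ∀ s ∈ ks, ∀ t ∈ ks, lt s t → ∀ a ∈ f s, ∀ b ∈ f t, R a b) :
    (ks.flatMap f).Pairwise R := by
  induction ks with
  | nil => simp
  | cons k ks ih =>
    rw [List.flatMap_cons, List.pairwise_append]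
    rcases List.pairwise_cons.mp hks with ⟨hk, hks'⟩
    refine ⟨hin k (by simp), ih hks' (fun s hs => hin s (by simp [hs]))
      (fun s hs t ht => hcross s (by simp [hs]) t (by simp [ht])), ?_⟩
    intro a ha b hb
    rcases List.mem_flatMap.mp hb with ⟨t, ht, hbt⟩
    exact hcross k (by simp) t (by simp [ht]) (hk t ht) a ha b hbt

-- the core equality of the two pre-slice lists
theorem presort_eq (models : List String) :
    (PySem.List.sorted2
        ((dedupModels models).foldl (fun acc model_id =>
          let score := probePriority model_id
          if score ≥ 1000 then acc else acc ++ [(score, model_id)]) [])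
        (fun item => item.1) (fun item => PySem.Str.lower item.2)).map (fun item => item.2)
    = ((PySem.List.sorted (PySem.Dict.keys
          ((dedupModels models).foldl (fun d model_id =>
            let score := probePriority model_id
            if score < 1000 then d.modify score [] (fun b => b ++ [model_id]) else d)
            PySem.Dict.empty)) (fun k => k)).foldl
        (fun acc score => acc ++ PySem.List.sorted
          ((((dedupModels models).foldl (fun d model_id =>
            let score := probePriority model_id
            if score < 1000 then d.modify score [] (fun b => b ++ [model_id]) else d)
            PySem.Dict.empty)).getD score []) (fun m => PySem.Str.lower m)) []) := by
  set cleaned := dedupModels models with hcle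
  set filt := cleaned.filter (fun m => decide (probePriority m < 1000)) with hfilt
  set pairf : String → Int × String := fun m => (probePriority m, m) with hpairf
  -- A's accumulation loop is a filter + map
  have hA : cleaned.foldl (fun acc model_id =>
      let score := probePriority model_id
      if score ≥ 1000 then acc else acc ++ [(score, model_id)]) [] = filt.map pairf := by
    have hfun : (fun (acc : List (Int × String)) model_id =>
        let score := probePriority model_id
        if score ≥ 1000 then acc else acc ++ [(score, model_id)])
        = (fun acc m => if probePriority m < 1000 then acc ++ [pairf m] else acc) := by
      funext acc m
      by_cases h : probePriority m < 1000
      · simp [h, not_le.mpr h, pairf]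
      · simp [h, not_lt.mp h]
    rw [hfun, PySem.List.foldl_append_ite (fun m => probePriority m < 1000) pairf cleaned []]
    simp [hfilt]
  -- B's bucket loop, over the same filtered list, as a fold over key/value pairs
  have hB : cleaned.foldl (fun d model_id =>
      let score := probePriority model_id
      if score < 1000 then d.modify score [] (fun b => b ++ [model_id]) else d) PySem.Dict.empty
      = (filt.map pairf).foldl (fun d p => d.modify p.1 [] (fun b => b ++ [p.2])) PySem.Dict.empty := by
    have hfunB : (fun (d : PySem.Dict Int (List String)) model_id =>
        let score := probePriority model_id
        if score < 1000 then d.modify score [] (fun b => b ++ [model_id]) else d)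
        = (fun (d : PySem.Dict Int (List String)) m => if probePriority m < 1000
            then d.modify (probePriority m) [] (fun b => b ++ [m]) else d) := rfl
    have h1 := PySem.List.foldl_ite_eq_foldl_filter (p := fun m => probePriority m < 1000)
      (f := fun (d : PySem.Dict Int (List String)) m =>
        d.modify (probePriority m) [] (fun b => b ++ [m])) (l := cleaned) (init := PySem.Dict.empty)
    rw [hfunB, h1, List.foldl_map]
  rw [hA, hB]
  -- bucket contents and keys
  have hbucket : ∀ s : Int,
      ((filt.map pairf).foldl (fun d p => d.modify p.1 [] (fun b => b ++ [p.2]))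
        PySem.Dict.empty).getD s []
      = filt.filter (fun m => probePriority m == s) := by
    intro s
    rw [PySem.Dict.getD_foldl_modify_append, PySem.Dict.getD_empty, List.nil_append,
      List.filter_map]
    have : ((fun p : Int × String => p.1 == s) ∘ pairf) = fun m => probePriority m == s := rfl
    rw [this, List.map_map,
      show ((fun x : Int × String => x.2) ∘ fun m => (probePriority m, m)) = id from rfl,
      List.map_id]
  have hkeys : ((filt.map pairf).foldl (fun d p => d.modify p.1 [] (fun b => b ++ [p.2]))
      PySem.Dict.empty).keys = PySem.Set.ofList (filt.map probePriority) := by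
    rw [PySem.Dict.keys_foldl_modify_key (filt.map pairf) (fun p => p.1) []
      (fun _ p => (fun b => b ++ [p.2])) PySem.Dict.empty]
    rw [PySem.Dict.keys_empty, PySem.Set.update_nil_left, List.map_map]
    rfl
  simp only [hkeys, hbucket]
  rw [PySem.List.foldl_append_eq_flatMap, List.nil_append]
  -- name the two sides
  set sortedKeys := PySem.List.sorted (PySem.Set.ofList (filt.map probePriority)) (fun k => k)
    with hsk
  set ysStr := sortedKeys.flatMap
    (fun s => PySem.List.sorted (filt.filter (fun m => probePriority m == s))
      (fun m => PySem.Str.lower m)) with hys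
  -- distinct casefold keys survive filtering / sorting
  have hlowced := cleaned_low_nodup models
  have hlowfilt : (filt.map PySem.Str.lower).Nodup :=
    (List.filter_sublist.map PySem.Str.lower).nodup hlowced
  -- ysStr is a permutation of filt
  have hperm : ysStr.Perm filt := by
    have h1 : ysStr.Perm (sortedKeys.flatMap
        (fun s => filt.filter (fun m => probePriority m == s))) :=
      List.Perm.flatMap_left sortedKeys (fun s _ => PySem.List.sorted_perm _ _ _)
    have h2 : (sortedKeys.flatMap (fun s => filt.filter (fun m => probePriority m == s))).Perm
        ((PySem.Set.ofList (filt.map probePriority)).flatMap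
          (fun s => filt.filter (fun m => probePriority m == s))) :=
      List.Perm.flatMap_right _ (PySem.List.sorted_perm _ _ _)
    refine (h1.trans h2).trans ?_
    apply flatMap_filter_key_perm
    · exact PySem.Set.nodup_ofList _
    · intro a ha
      exact (PySem.Set.mem_ofList _ _).mpr (List.mem_map.mpr ⟨a, ha, rfl⟩)
  -- ysStr is strictly increasing under the lexicographic key
  have hpair : ysStr.Pairwise (fun a b =>
      toLex (probePriority a, PySem.Str.lower a) < toLex (probePriority b, PySem.Str.lower b)) := by
    apply pairwise_flatMap_buckets _ (fun s t : Int => s < t)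
    · exact PySem.List.sorted_ofList_pairwise_lt _
    · intro s _
      have hle := PySem.List.sorted_pairwise (filt.filter (fun m => probePriority m == s))
        (fun m => PySem.Str.lower m)
      have hnd : ((PySem.List.sorted (filt.filter (fun m => probePriority m == s))
          (fun m => PySem.Str.lower m)).map PySem.Str.lower).Nodup := by
        refine ((PySem.List.sorted_perm (filt.filter (fun m => probePriority m == s))
          (fun m => PySem.Str.lower m) false).map PySem.Str.lower).symm.nodup ?_
        exact (List.filter_sublist.map PySem.Str.lower).nodup hlowfilt
      have hnd' : (PySem.List.sorted (filt.filter (fun m => probePriority m == s))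
          (fun m => PySem.Str.lower m)).Pairwise
          (fun a b => PySem.Str.lower a ≠ PySem.Str.lower b) := List.pairwise_map.mp hnd
      refine (hle.and hnd').imp_of_mem ?_
      intro a b ha hb hab
      have ha2 := List.of_mem_filter ((PySem.List.mem_sorted _ _ _ a).mp ha)
      have hb2 := List.of_mem_filter ((PySem.List.mem_sorted _ _ _ b).mp hb)
      have hpa : probePriority a = s := by simpa using ha2
      have hpb : probePriority b = s := by simpa using hb2
      exact Prod.Lex.toLex_lt_toLex.mpr
        (Or.inr ⟨by rw [hpa, hpb], lt_of_le_of_ne hab.1 hab.2⟩)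
    · intro s _ t _ hst a ha b hb
      have ha2 := List.of_mem_filter ((PySem.List.mem_sorted _ _ _ a).mp ha)
      have hb2 := List.of_mem_filter ((PySem.List.mem_sorted _ _ _ b).mp hb)
      have hpa : probePriority a = s := by simpa using ha2
      have hpb : probePriority b = t := by simpa using hb2
      exact Prod.Lex.toLex_lt_toLex.mpr (Or.inl (by rw [hpa, hpb]; exact hst))
  -- conclude via the uniqueness of the sorted order
  have hsort : PySem.List.sorted (filt.map pairf)
      (fun p => toLex (p.1, PySem.Str.lower p.2)) = ysStr.map pairf := by
    apply PySem.List.sorted_eq_of_perm_of_pairwise_lt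
    · exact hperm.map pairf
    · exact List.pairwise_map.mpr hpair
  rw [sorted2_as_lex, hsort, List.map_map,
    show ((fun item : Int × String => item.2) ∘ fun m => (probePriority m, m)) = id from rfl,
    List.map_id]

-- ===== VERDICT (by name: the statement is the Claim_ definition above) =====
theorem prioritize_probe_candidates_py_spec : Claim_equal_prioritize_probe_candidates_py := by
  intro models max_probe _
  unfold Spec_prioritize_probe_candidates_py prioritize_probe_candidates_py
    prioritize_probe_candidates_py_alt
  simp only []
  have h := presort_eq models
  by_cases hmp : max_probe ≤ 0
  · simp only [if_pos hmp]
    exact h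
  · simp only [if_neg hmp]
    rw [PySem.List.slice_to _ (show (0:Int) ≤ max_probe by omega),
      PySem.List.slice_to _ (show (0:Int) ≤ max_probe by omega), List.map_take, h]
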